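-- pv_equiv track=rewrite | github.com/duskje/gigamesh | main.py | midi_data_to_internal_data
-- ===== SOURCE A (Python) =====
-- from itertools import islice
--
-- def batched(iterable, n):
--     it = iter(iterable)
--
--     while batch := tuple(islice(it, n)):
--         yield batch
--
-- def midi_data_to_internal_data(raw_data: tuple[int]) -> tuple[int]:
--     internal_data: list[int] = []
--
--     for batch in batched(raw_data, n=8):
--         leading_bits = 0
--
--         for i, byte in enumerate(batch):
--             if byte == 0b11110111:
--                 break
--
--             if i == 0:
--                 leading_bits = byte
--             else:
--                 leading_bit = leading_bits & (0b1 << i - 1)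
--                 internal_data.append(byte | (leading_bit << (7 - (i - 1))))
--
--     return tuple(internal_data)
-- ===== SOURCE B (Python) =====
-- def midi_data_to_internal_data(raw_data: tuple[int]) -> tuple[int]:
--     # Single flat pass: within-batch index is j % 8; a skip flag replaces the inner break.
--     result = []
--     skip = False
--     leading_bits = 0
--     for j, byte in enumerate(raw_data):
--         i = j % 8
--         if i == 0:
--             skip = False
--             if byte == 0xF7:
--                 skip = True
--                 continue
--             leading_bits = byte
--         else:
--             if skip:
--                 continue
--             if byte == 0xF7:
--                 skip = True
--                 continue
--             result.append(byte | ((leading_bits & (1 << (i - 1))) << (7 - (i - 1))))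
--     return tuple(result)
-- ===== Notes on version B (the rewrite author's own statement) =====
-- stated objective: simpler
-- what changed: Replaced A's batched-generator plus nested loop with an inner break by a single flat pass over raw_data that computes the within-batch index as j % 8 and carries a skip flag instead of breaking.
import Mathlib
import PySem

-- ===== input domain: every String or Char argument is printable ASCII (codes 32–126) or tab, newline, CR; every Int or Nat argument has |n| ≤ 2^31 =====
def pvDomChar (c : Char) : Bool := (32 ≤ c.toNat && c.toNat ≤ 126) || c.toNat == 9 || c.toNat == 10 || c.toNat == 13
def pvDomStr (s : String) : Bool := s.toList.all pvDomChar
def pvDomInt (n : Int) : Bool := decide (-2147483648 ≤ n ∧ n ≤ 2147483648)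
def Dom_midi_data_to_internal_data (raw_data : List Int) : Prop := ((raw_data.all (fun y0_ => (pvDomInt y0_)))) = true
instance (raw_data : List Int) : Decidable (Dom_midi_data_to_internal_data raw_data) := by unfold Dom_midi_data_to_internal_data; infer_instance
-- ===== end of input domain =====

-- B replaces A's batched-generator + nested loop (with break) by one flat pass using i = j % 8 and a skip flag (objective: simpler).
-- ===== PORT A =====
-- inner 'for i, byte in enumerate(batch)' loop of A, with its break on 0xF7
def pvBatchInner (batch : List Int) (i : Nat) (leading_bits : Int) (acc : List Int) : List Int :=
  match batch with
  | [] => acc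
  | byte :: rest =>
    if byte = 247 then acc
    else if i = 0 then pvBatchInner rest (i + 1) byte acc
    else pvBatchInner rest (i + 1) leading_bits
      (acc ++ [PySem.Int.bor byte (PySem.Int.band leading_bits ((1 : Int) <<< (i - 1)) <<< (7 - (i - 1)))])

-- outer 'for batch in batched(raw_data, n=8)' loop of A
def pvOuter (l : List Int) (acc : List Int) : List Int :=
  if h : l = [] then acc
  else pvOuter (l.drop 8) (pvBatchInner (l.take 8) 0 0 acc)
termination_by l.length
decreasing_by
  have : l.length ≠ 0 := fun hl => h (List.eq_nil_of_length_eq_zero hl)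
  simp; omega

def midi_data_to_internal_data (raw_data : List Int) : List Int :=
  pvOuter raw_data []

-- ===== PORT B =====
-- B's single 'for j, byte in enumerate(raw_data)' loop with i = j % 8, a skip flag and leading_bits
def pvAltLoop (l : List Int) (j : Nat) (skip : Bool) (leading_bits : Int) (res : List Int) : List Int :=
  match l with
  | [] => res
  | byte :: rest =>
    let i := j % 8
    if i = 0 then
      if byte = 247 then pvAltLoop rest (j + 1) true leading_bits res
      else pvAltLoop rest (j + 1) false byte res
    else if skip then pvAltLoop rest (j + 1) skip leading_bits res
    else if byte = 247 then pvAltLoop rest (j + 1) true leading_bits res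
    else pvAltLoop rest (j + 1) skip leading_bits
      (res ++ [PySem.Int.bor byte (PySem.Int.band leading_bits ((1 : Int) <<< (i - 1)) <<< (7 - (i - 1)))])

def midi_data_to_internal_data_alt (raw_data : List Int) : List Int :=
  pvAltLoop raw_data 0 false 0 []

-- ===== PRECONDITION & SPEC =====
def Spec_midi_data_to_internal_data (raw_data : List Int) (out : List Int) : Prop := out = midi_data_to_internal_data_alt raw_data
instance (raw_data : List Int) (out : List Int) : Decidable (Spec_midi_data_to_internal_data raw_data out) := by unfold Spec_midi_data_to_internal_data; infer_instance

-- ===== CLAIM (what is proved, stated in full; the proofs are below) =====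
def Claim_equal_midi_data_to_internal_data : Prop := ∀ (raw_data : List Int), Dom_midi_data_to_internal_data raw_data → Spec_midi_data_to_internal_data raw_data (midi_data_to_internal_data raw_data)

-- ===== LEMMAS AND PROOFS =====

-- step equations for B's loop
theorem alt_zero_hit (t : List Int) (j : Nat) (s : Bool) (ld : Int) (r : List Int) (hj : j % 8 = 0) :
    pvAltLoop (247 :: t) j s ld r = pvAltLoop t (j + 1) true ld r := by
  simp [pvAltLoop, hj]

theorem alt_zero_miss (b : Int) (t : List Int) (j : Nat) (s : Bool) (ld : Int) (r : List Int)
    (hj : j % 8 = 0) (hb : ¬ b = 247) :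
    pvAltLoop (b :: t) j s ld r = pvAltLoop t (j + 1) false b r := by
  simp [pvAltLoop, hj, hb]

theorem alt_skip (b : Int) (t : List Int) (j : Nat) (ld : Int) (r : List Int) (hj : ¬ j % 8 = 0) :
    pvAltLoop (b :: t) j true ld r = pvAltLoop t (j + 1) true ld r := by
  simp [pvAltLoop, hj]

theorem alt_pos_hit (t : List Int) (j : Nat) (ld : Int) (r : List Int) (hj : ¬ j % 8 = 0) :
    pvAltLoop (247 :: t) j false ld r = pvAltLoop t (j + 1) true ld r := by
  simp [pvAltLoop, hj]

theorem alt_pos_app (b : Int) (t : List Int) (j : Nat) (ld : Int) (r : List Int)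
    (hj : ¬ j % 8 = 0) (hb : ¬ b = 247) :
    pvAltLoop (b :: t) j false ld r = pvAltLoop t (j + 1) false ld
      (r ++ [PySem.Int.bor b (PySem.Int.band ld ((1 : Int) <<< (j % 8 - 1)) <<< (7 - (j % 8 - 1)))]) := by
  simp [pvAltLoop, hj, hb]

-- step equations for A's inner loop
theorem binner_hit (t : List Int) (i : Nat) (ld : Int) (r : List Int) :
    pvBatchInner (247 :: t) i ld r = r := by
  simp [pvBatchInner]

theorem binner_zero (b : Int) (t : List Int) (ld : Int) (r : List Int) (hb : ¬ b = 247) :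
    pvBatchInner (b :: t) 0 ld r = pvBatchInner t 1 b r := by
  simp [pvBatchInner, hb]

theorem binner_pos (b : Int) (t : List Int) (i : Nat) (ld : Int) (r : List Int)
    (hi : ¬ i = 0) (hb : ¬ b = 247) :
    pvBatchInner (b :: t) i ld r = pvBatchInner t (i + 1) ld
      (r ++ [PySem.Int.bor b (PySem.Int.band ld ((1 : Int) <<< (i - 1)) <<< (7 - (i - 1)))]) := by
  simp [pvBatchInner, hi, hb]

-- step equations for A's outer loop
theorem pvOuter_nil (r : List Int) : pvOuter [] r = r := by
  rw [pvOuter]; simp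

theorem pvOuter_ne (l : List Int) (r : List Int) (h : ¬ l = []) :
    pvOuter l r = pvOuter (l.drop 8) (pvBatchInner (l.take 8) 0 0 r) := by
  rw [pvOuter]; simp [h]

-- pvAltLoop only looks at j through j % 8
theorem pvAltLoop_mod (l : List Int) : ∀ (j : Nat) (s : Bool) (ld : Int) (r : List Int),
    pvAltLoop l j s ld r = pvAltLoop l (j % 8) s ld r := by
  induction l with
  | nil => intro j s ld r; rfl
  | cons b t ih =>
    intro j s ld r
    have hmm : j % 8 % 8 = j % 8 := by omega
    have hmod : (j % 8 + 1) % 8 = (j + 1) % 8 := by omega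
    by_cases hb : b = 247
    · subst hb
      by_cases hi : j % 8 = 0
      · rw [alt_zero_hit t j s ld r hi, alt_zero_hit t (j % 8) s ld r (by omega),
            ih (j + 1), ih (j % 8 + 1), hmod]
      · cases s
        · rw [alt_pos_hit t j ld r hi, alt_pos_hit t (j % 8) ld r (by omega),
              ih (j + 1), ih (j % 8 + 1), hmod]
        · rw [alt_skip 247 t j ld r hi, alt_skip 247 t (j % 8) ld r (by omega),
              ih (j + 1), ih (j % 8 + 1), hmod]
    · by_cases hi : j % 8 = 0
      · rw [alt_zero_miss b t j s ld r hi hb, alt_zero_miss b t (j % 8) s ld r (by omega) hb,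
            ih (j + 1), ih (j % 8 + 1), hmod]
      · cases s
        · rw [alt_pos_app b t j ld r hi hb, alt_pos_app b t (j % 8) ld r (by omega) hb,
              ih (j + 1), ih (j % 8 + 1), hmod, hmm]
        · rw [alt_skip b t j ld r hi, alt_skip b t (j % 8) ld r (by omega),
              ih (j + 1), ih (j % 8 + 1), hmod]

-- with skip = true the value of leading_bits is irrelevant
theorem pvAltLoop_ld (l : List Int) : ∀ (j : Nat) (ld ld' : Int) (r : List Int),
    pvAltLoop l j true ld r = pvAltLoop l j true ld' r := by
  induction l with
  | nil => intro j ld ld' r; rfl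
  | cons b t ih =>
    intro j ld ld' r
    by_cases hi : j % 8 = 0
    · by_cases hb : b = 247
      · subst hb; rw [alt_zero_hit t j true ld r hi, alt_zero_hit t j true ld' r hi, ih]
      · rw [alt_zero_miss b t j true ld r hi hb, alt_zero_miss b t j true ld' r hi hb]
    · rw [alt_skip b t j ld r hi, alt_skip b t j ld' r hi, ih]

-- at a batch boundary (j % 8 = 0) the carried skip and leading_bits are irrelevant
theorem pvAltLoop_zero (l : List Int) (j : Nat) (s : Bool) (ld : Int) (r : List Int)
    (hj : j % 8 = 0) : pvAltLoop l j s ld r = pvAltLoop l 0 false 0 r := by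
  cases l with
  | nil => rfl
  | cons b t =>
    have h1 : (j + 1) % 8 = 1 := by omega
    by_cases hb : b = 247
    · subst hb
      rw [alt_zero_hit t j s ld r hj, alt_zero_hit t 0 false 0 r (by omega),
          pvAltLoop_mod t (j + 1), h1, pvAltLoop_ld t 1 ld 0]
    · rw [alt_zero_miss b t j s ld r hj hb, alt_zero_miss b t 0 false 0 r (by omega) hb,
          pvAltLoop_mod t (j + 1), h1]

-- skip = true discards the remainder of the current batch, then resumes fresh at the next boundary
theorem pvAltLoop_skip (batch : List Int) : ∀ (rest : List Int) (j : Nat) (ld : Int) (r : List Int),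
    1 ≤ j % 8 → j % 8 + batch.length = 8 →
    pvAltLoop (batch ++ rest) j true ld r = pvAltLoop rest 0 false 0 r := by
  induction batch with
  | nil =>
    intro rest j ld r h1 h2
    exact absurd h2 (by simp; omega)
  | cons b t ih =>
    intro rest j ld r h1 h2
    simp only [List.length_cons] at h2
    rw [List.cons_append, alt_skip b (t ++ rest) j ld r (by omega)]
    by_cases h7 : j % 8 = 7
    · have ht : t = [] := by
        cases t with
        | nil => rfl
        | cons x xs => exfalso; simp at h2; omega
      subst ht
      simp only [List.nil_append]
      exact pvAltLoop_zero rest (j + 1) true ld r (by omega)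
    · exact ih rest (j + 1) ld r (by omega) (by omega)

-- when skip is set inside the final batch, the rest of the input is discarded
theorem pvAltLoop_skipnil (t : List Int) : ∀ (j : Nat) (ld : Int) (r : List Int),
    1 ≤ j % 8 → j % 8 + t.length ≤ 8 → pvAltLoop t j true ld r = r := by
  induction t with
  | nil => intro j ld r _ _; rfl
  | cons b s ih =>
    intro j ld r h1 h2
    simp only [List.length_cons] at h2
    rw [alt_skip b s j ld r (by omega)]
    by_cases h7 : j % 8 = 7
    · have hs : s = [] := by
        cases s with
        | nil => rfl
        | cons x xs => exfalso; simp at h2; omega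
      subst hs; rfl
    · exact ih (j + 1) ld r (by omega) (by omega)

-- a full 8-element window starting at offset j % 8 is processed exactly like A's inner batch loop
theorem pvAltLoop_inner (batch : List Int) : ∀ (rest : List Int) (j : Nat) (ld : Int) (r : List Int),
    j % 8 + batch.length = 8 →
    pvAltLoop (batch ++ rest) j false ld r = pvAltLoop rest 0 false 0 (pvBatchInner batch (j % 8) ld r) := by
  induction batch with
  | nil =>
    intro rest j ld r h2
    exact absurd h2 (by simp; have := Nat.mod_lt j (y := 8) (by omega); omega)
  | cons b t ih =>
    intro rest j ld r h2
    simp only [List.length_cons] at h2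
    rw [List.cons_append]
    by_cases hb : b = 247
    · subst hb
      rw [binner_hit t (j % 8) ld r]
      by_cases hi : j % 8 = 0
      · rw [alt_zero_hit (t ++ rest) j false ld r hi]
        exact pvAltLoop_skip t rest (j + 1) ld r (by omega) (by omega)
      · rw [alt_pos_hit (t ++ rest) j ld r hi]
        by_cases h7 : j % 8 = 7
        · have ht : t = [] := by
            cases t with
            | nil => rfl
            | cons x xs => exfalso; simp at h2; omega
          subst ht
          simp only [List.nil_append]
          exact pvAltLoop_zero rest (j + 1) true ld r (by omega)
        · exact pvAltLoop_skip t rest (j + 1) ld r (by omega) (by omega)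
    · by_cases hi : j % 8 = 0
      · rw [alt_zero_miss b (t ++ rest) j false ld r hi hb, hi, binner_zero b t ld r hb,
            ih rest (j + 1) b r (by omega)]
        have h1 : (j + 1) % 8 = 1 := by omega
        rw [h1]
      · rw [alt_pos_app b (t ++ rest) j ld r hi hb, binner_pos b t (j % 8) ld r hi hb]
        by_cases h7 : j % 8 = 7
        · have ht : t = [] := by
            cases t with
            | nil => rfl
            | cons x xs => exfalso; simp at h2; omega
          subst ht
          simp only [List.nil_append, pvBatchInner]
          exact pvAltLoop_zero rest (j + 1) false ld _ (by omega)
        · rw [ih rest (j + 1) ld _ (by omega)]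
          have hj1 : (j + 1) % 8 = j % 8 + 1 := by omega
          rw [hj1]

-- a final partial batch (no wrap-around) is also processed like A's inner loop
theorem pvAltLoop_partial (batch : List Int) : ∀ (j : Nat) (ld : Int) (r : List Int),
    j % 8 + batch.length ≤ 8 →
    pvAltLoop batch j false ld r = pvBatchInner batch (j % 8) ld r := by
  induction batch with
  | nil => intro j ld r _; rfl
  | cons b t ih =>
    intro j ld r h2
    simp only [List.length_cons] at h2
    by_cases hb : b = 247
    · subst hb
      rw [binner_hit t (j % 8) ld r]
      by_cases hi : j % 8 = 0
      · rw [alt_zero_hit t j false ld r hi]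
        exact pvAltLoop_skipnil t (j + 1) ld r (by omega) (by omega)
      · rw [alt_pos_hit t j ld r hi]
        by_cases h7 : j % 8 = 7
        · have ht : t = [] := by
            cases t with
            | nil => rfl
            | cons x xs => exfalso; simp at h2; omega
          subst ht; rfl
        · exact pvAltLoop_skipnil t (j + 1) ld r (by omega) (by omega)
    · by_cases hi : j % 8 = 0
      · rw [alt_zero_miss b t j false ld r hi hb, hi, binner_zero b t ld r hb,
            ih (j + 1) b r (by omega)]
        have h1 : (j + 1) % 8 = 1 := by omega
        rw [h1]
      · rw [alt_pos_app b t j ld r hi hb, binner_pos b t (j % 8) ld r hi hb]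
        by_cases h7 : j % 8 = 7
        · have ht : t = [] := by
            cases t with
            | nil => rfl
            | cons x xs => exfalso; simp at h2; omega
          subst ht; rfl
        · rw [ih (j + 1) ld _ (by omega)]
          have hj1 : (j + 1) % 8 = j % 8 + 1 := by omega
          rw [hj1]

-- A's chunked outer loop equals B's flat loop, by strong induction on the length
theorem pvOuter_eq (n : Nat) : ∀ (l : List Int) (r : List Int), l.length ≤ n →
    pvOuter l r = pvAltLoop l 0 false 0 r := by
  induction n with
  | zero =>
    intro l r h
    have : l = [] := by cases l <;> simp_all
    subst this
    exact pvOuter_nil r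
  | succ n ih =>
    intro l r h
    by_cases hl : l = []
    · subst hl; exact pvOuter_nil r
    · rw [pvOuter_ne l r hl]
      by_cases h8 : 8 ≤ l.length
      · have hinner := pvAltLoop_inner (l.take 8) (l.drop 8) 0 0 r (by simp; omega)
        rw [List.take_append_drop] at hinner
        simp only [Nat.zero_mod] at hinner
        rw [hinner]
        exact ih (l.drop 8) _ (by simp; omega)
      · have hdrop : l.drop 8 = [] := by
          apply List.eq_nil_of_length_eq_zero; simp; omega
        have htake : l.take 8 = l := List.take_of_length_le (by omega)
        have hpart := pvAltLoop_partial l 0 0 r (by simpa using by omega)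
        simp only [Nat.zero_mod] at hpart
        rw [hdrop, htake, pvOuter_nil, hpart]

-- ===== VERDICT (by name: the statement is the Claim_ definition above) =====
theorem midi_data_to_internal_data_spec : Claim_equal_midi_data_to_internal_data := by
  intro raw_data _
  unfold Spec_midi_data_to_internal_data midi_data_to_internal_data midi_data_to_internal_data_alt
  exact pvOuter_eq raw_data.length raw_data [] le_rfl
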